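-- pv_equiv track=rewrite | github.com/rienafairefr/glacier-vault-remove | test.py | _get_mock_data
-- ===== SOURCE A (Python) =====
-- vaultarn = 'VAULTARN'
--
-- inventorydate = '2017-04-04T17:14:26Z'
--
-- creationdate = '2016-02-08T21:28:06Z'
--
-- def _get_mock_data(narchives):
-- 	for c in '{"VaultARN":"' + vaultarn + '","InventoryDate":"' + inventorydate + '","ArchiveList":[':
-- 		yield c
-- 	first = True
-- 	for i in range(narchives):
-- 		if first:
-- 			first = False
-- 		else:
-- 			yield ','
-- 		for c in '{"ArchiveId":"' + str(
-- 				i) + '","ArchiveDescription":"","CreationDate":"' + creationdate + '","Size":13865,"SHA256TreeHash":""}':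
-- 			yield c
-- 	yield ']'
-- 	yield '}'
-- ===== SOURCE B (Python) =====
-- vaultarn = 'VAULTARN'
--
-- inventorydate = '2017-04-04T17:14:26Z'
--
-- creationdate = '2016-02-08T21:28:06Z'
--
-- def _get_mock_data(narchives):
-- 	header = '{"VaultARN":"' + vaultarn + '","InventoryDate":"' + inventorydate + '","ArchiveList":['
-- 	body = ','.join(
-- 		'{"ArchiveId":"' + str(i) + '","ArchiveDescription":"","CreationDate":"'
-- 		+ creationdate + '","Size":13865,"SHA256TreeHash":""}'
-- 		for i in range(narchives))
-- 	full = header + body + ']}'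
-- 	yield from full
-- ===== Notes on version B (the rewrite author's own statement) =====
-- stated objective: simpler
-- what changed: B builds the whole JSON string once (header + ','.join of per-archive templates + ']}') and emits it with a single 'yield from', replacing A's interleaved per-archive character loops and the 'first' separator flag.
import Mathlib
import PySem

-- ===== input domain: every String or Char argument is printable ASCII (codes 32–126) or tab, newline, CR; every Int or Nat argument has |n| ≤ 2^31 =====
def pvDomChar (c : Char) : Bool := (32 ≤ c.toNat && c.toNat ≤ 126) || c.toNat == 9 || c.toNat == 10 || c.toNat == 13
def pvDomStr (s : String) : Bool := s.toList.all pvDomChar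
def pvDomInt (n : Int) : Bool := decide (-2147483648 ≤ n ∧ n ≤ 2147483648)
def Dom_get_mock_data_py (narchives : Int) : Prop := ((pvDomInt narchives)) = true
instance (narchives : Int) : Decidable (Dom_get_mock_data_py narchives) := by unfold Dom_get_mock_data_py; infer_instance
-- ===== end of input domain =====

-- B builds the full JSON string once (header + ",".join of per-archive templates + "]}") and
-- emits it in one pass; A interleaves per-archive character loops with a 'first' flag. Objective: simpler.

-- module-level globals shared by both versions
def pvVaultarn : String := "VAULTARN"
def pvInventorydate : String := "2017-04-04T17:14:26Z"
def pvCreationdate : String := "2016-02-08T21:28:06Z"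

-- ===== PORT A =====
-- the generator's yields collected in order; each yielded character is a one-character String
def get_mock_data_py (narchives : Int) : List String :=
  let out0 : List String :=
    ("{\"VaultARN\":\"" ++ pvVaultarn ++ "\",\"InventoryDate\":\"" ++ pvInventorydate
      ++ "\",\"ArchiveList\":[").toList.map (fun c => String.ofList [c])
  let st := (PySem.List.pyRange 0 narchives 1).foldl
    (fun (st : Bool × List String) i =>
      let st1 : Bool × List String := if st.1 then (false, st.2) else (st.1, st.2 ++ [","])
      (st1.1, st1.2 ++
        ("{\"ArchiveId\":\"" ++ PySem.Int.toStr i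
          ++ "\",\"ArchiveDescription\":\"\",\"CreationDate\":\"" ++ pvCreationdate
          ++ "\",\"Size\":13865,\"SHA256TreeHash\":\"\"}").toList.map (fun c => String.ofList [c])))
    (true, out0)
  st.2 ++ ["]", "}"]

-- ===== PORT B =====
def pvHeader : String :=
  "{\"VaultARN\":\"" ++ pvVaultarn ++ "\",\"InventoryDate\":\"" ++ pvInventorydate
    ++ "\",\"ArchiveList\":["

def pvArchive (i : Int) : String :=
  "{\"ArchiveId\":\"" ++ PySem.Int.toStr i
    ++ "\",\"ArchiveDescription\":\"\",\"CreationDate\":\"" ++ pvCreationdate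
    ++ "\",\"Size\":13865,\"SHA256TreeHash\":\"\"}"

def get_mock_data_py_alt (narchives : Int) : List String :=
  let body := PySem.Str.join "," ((PySem.List.pyRange 0 narchives 1).map pvArchive)
  let full := pvHeader ++ body ++ "]}"
  full.toList.map (fun c => String.ofList [c])

-- ===== PRECONDITION & SPEC =====
def Spec_get_mock_data_py (narchives : Int) (out : List String) : Prop := out = get_mock_data_py_alt narchives
instance (narchives : Int) (out : List String) : Decidable (Spec_get_mock_data_py narchives out) := by unfold Spec_get_mock_data_py; infer_instance

-- ===== CLAIM (what is proved, stated in full; the proofs are below) =====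
def Claim_equal_get_mock_data_py : Prop := ∀ (narchives : Int), Dom_get_mock_data_py narchives → Spec_get_mock_data_py narchives (get_mock_data_py narchives)

-- ===== LEMMAS AND PROOFS =====

def pvChars (s : String) : List String := s.toList.map (fun c => String.ofList [c])

theorem pvChars_append (s t : String) : pvChars (s ++ t) = pvChars s ++ pvChars t := by
  simp [pvChars]

def pvF : Bool × List String → Int → Bool × List String :=
  fun st i =>
    let st1 : Bool × List String := if st.1 then (false, st.2) else (st.1, st.2 ++ [","])
    (st1.1, st1.2 ++ pvChars (pvArchive i))

theorem pvF_loop_false (l : List Int) (acc : List String) :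
    (l.foldl pvF (false, acc)).2
      = acc ++ l.flatMap (fun i => pvChars ("," ++ pvArchive i)) := by
  induction l generalizing acc with
  | nil => simp
  | cons a t ih =>
      simp only [List.foldl_cons, pvF, Bool.false_eq_true, if_false, List.flatMap_cons]
      rw [ih, pvChars_append]
      have hc : pvChars "," = [","] := by decide
      simp [hc]

theorem pvJoinChars (ps : List (List Char)) (a : List Char) :
    PySem.Chars.join [','] (a :: ps) = a ++ ps.flatMap (fun p => ',' :: p) := by
  induction ps generalizing a with
  | nil => simp [PySem.Chars.join_singleton]
  | cons b t ih =>
      rw [PySem.Chars.join_cons_cons, ih]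
      simp

theorem pvJoin_cons (xs : List String) (x : String) :
    pvChars (PySem.Str.join "," (x :: xs))
      = pvChars x ++ xs.flatMap (fun s => pvChars ("," ++ s)) := by
  have hc : ("," : String).toList = [','] := rfl
  simp [pvChars, hc, pvJoinChars, List.map_flatMap, List.flatMap_map]

theorem pvFold_join (l : List Int) :
    (l.foldl pvF (true, pvChars pvHeader)).2
      = pvChars pvHeader ++ pvChars (PySem.Str.join "," (l.map pvArchive)) := by
  cases l with
  | nil =>
      have h0 : pvChars (PySem.Str.join "," []) = [] := by decide
      simp [h0]
  | cons a t =>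
      simp only [List.foldl_cons, pvF, if_true, List.map_cons]
      rw [pvF_loop_false, pvJoin_cons]
      simp [List.flatMap_map]

-- ===== VERDICT (by name: the statement is the Claim_ definition above) =====
theorem get_mock_data_py_spec : Claim_equal_get_mock_data_py := by
  intro n _
  show (List.foldl pvF (true, pvChars pvHeader) (PySem.List.pyRange 0 n 1)).2 ++ ["]", "}"]
      = pvChars (pvHeader ++ PySem.Str.join "," ((PySem.List.pyRange 0 n 1).map pvArchive) ++ "]}")
  rw [pvFold_join, pvChars_append, pvChars_append]
  have h : pvChars "]}" = ["]", "}"] := by decide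
  simp [h]
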